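-- pv_equiv track=rewrite | github.com/jrivas112/First-ResQ | backend/enhanced_rag.py | is_greeting
-- ===== SOURCE A (Python) =====
-- def is_greeting(query: str) -> bool:
--     """Detect if the query is just a greeting or casual conversation"""
--     greetings = [
--         "hi", "hello", "hey", "good morning", "good afternoon", "good evening",
--         "greetings", "what's up", "how are you", "howdy", "yo", "sup",
--         "good day", "hiya", "thanks", "thank you", "bye", "goodbye"
--     ]
--
--     query_lower = query.lower().strip()
--
--     # Check for exact matches or simple variations
--     for greeting in greetings:
--         if query_lower == greeting or query_lower == greeting + "!" or query_lower == greeting + ".":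
--             return True
--
--     # Check for very short, non-medical queries
--     if len(query_lower) <= 3 and query_lower.isalpha():
--         return True
--
--     return False
-- ===== SOURCE B (Python) =====
-- _GREETINGS = [
--     "hi", "hello", "hey", "good morning", "good afternoon", "good evening",
--     "greetings", "what's up", "how are you", "howdy", "yo", "sup",
--     "good day", "hiya", "thanks", "thank you", "bye", "goodbye"
-- ]
--
-- # all accepted spellings (base, base+"!", base+"."), sorted once for binary search
-- _VARIANTS = sorted(g + s for g in _GREETINGS for s in ("", "!", "."))
--
--
-- def is_greeting(query: str) -> bool:
--     q = query.lower().strip()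
--     lo, hi = 0, len(_VARIANTS)
--     while lo < hi:
--         mid = (lo + hi) // 2
--         if _VARIANTS[mid] < q:
--             lo = mid + 1
--         else:
--             hi = mid
--     if lo < len(_VARIANTS) and _VARIANTS[lo] == q:
--         return True
--     return len(q) <= 3 and q.isalpha()
-- ===== Notes on version B (the rewrite author's own statement) =====
-- stated objective: alternative
-- what changed: B precomputes the sorted list of all 54 accepted variant strings (each greeting plus its '!' and '.' forms) once and decides membership with a hand-written lower-bound binary search, instead of A's linear scan that builds and compares three variants per greeting on the fly; the short-alpha fallback is unchanged.
import Mathlib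
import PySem

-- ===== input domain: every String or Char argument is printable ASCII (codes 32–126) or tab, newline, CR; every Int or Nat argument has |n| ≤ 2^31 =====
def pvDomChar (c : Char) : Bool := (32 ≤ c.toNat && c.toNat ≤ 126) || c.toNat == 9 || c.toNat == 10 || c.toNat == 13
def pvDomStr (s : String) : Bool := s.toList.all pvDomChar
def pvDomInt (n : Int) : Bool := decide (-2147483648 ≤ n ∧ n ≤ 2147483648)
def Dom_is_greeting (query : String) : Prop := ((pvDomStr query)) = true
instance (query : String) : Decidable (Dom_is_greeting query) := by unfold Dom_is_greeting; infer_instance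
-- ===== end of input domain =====

-- B precomputes the sorted list of all 54 accepted variant strings once and decides membership
-- by a hand-written lower-bound binary search, instead of A's linear scan that builds three
-- variants per greeting on the fly; objective: alternative (no speed claim).


-- ===== PORT A =====
def pvGreetings : List String :=
  ["hi", "hello", "hey", "good morning", "good afternoon", "good evening",
   "greetings", "what's up", "how are you", "howdy", "yo", "sup",
   "good day", "hiya", "thanks", "thank you", "bye", "goodbye"]

def is_greeting (query : String) : Bool :=
  let query_lower := PySem.Str.strip (PySem.Str.lower query)
  -- the for-loop with early 'return True' over the greetings list
  if pvGreetings.any (fun g =>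
      query_lower == g || query_lower == g ++ "!" || query_lower == g ++ ".") then
    true
  else if decide (PySem.Str.len query_lower ≤ 3) && PySem.Str.strIsalpha query_lower then
    true
  else
    false

-- ===== PORT B =====
def pvGreetingsB : List String :=
  ["hi", "hello", "hey", "good morning", "good afternoon", "good evening",
   "greetings", "what's up", "how are you", "howdy", "yo", "sup",
   "good day", "hiya", "thanks", "thank you", "bye", "goodbye"]

-- _VARIANTS = sorted(g + s for g in _GREETINGS for s in ("", "!", "."))
def pvVariants : List String :=
  PySem.List.sorted (pvGreetingsB.flatMap (fun g => [g, g ++ "!", g ++ "."])) (fun x => x) false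

-- the 'while lo < hi' loop of Source B; fuel = hi - lo at entry (the loop always terminates since
-- the gap shrinks); indices lo, hi, mid are nonnegative Python ints, modelled as Nat, and
-- mid is always in range, so _VARIANTS[mid] is l.getD mid "" exactly
def pvBsLoop (l : List String) (q : String) : Nat → Nat → Nat → Nat
  | 0, lo, _ => lo
  | fuel + 1, lo, hi =>
    if lo < hi then
      let mid := (lo + hi) / 2
      if l.getD mid "" < q then pvBsLoop l q fuel (mid + 1) hi
      else pvBsLoop l q fuel lo mid
    else lo

def is_greeting_alt (query : String) : Bool :=
  let q := PySem.Str.strip (PySem.Str.lower query)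
  let lo := pvBsLoop pvVariants q pvVariants.length 0 pvVariants.length
  if decide (lo < pvVariants.length) && (pvVariants.getD lo "" == q) then
    true
  else
    decide (PySem.Str.len q ≤ 3) && PySem.Str.strIsalpha q

-- ===== PRECONDITION & SPEC =====
def Spec_is_greeting (query : String) (out : Bool) : Prop := out = is_greeting_alt query
instance (query : String) (out : Bool) : Decidable (Spec_is_greeting query out) := by unfold Spec_is_greeting; infer_instance

-- ===== CLAIM (what is proved, stated in full; the proofs are below) =====
def Claim_equal_is_greeting : Prop := ∀ (query : String), Dom_is_greeting query → Spec_is_greeting query (is_greeting query)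

-- ===== LEMMAS AND PROOFS =====

-- invariant of Source B's while loop: it returns the least index whose element is ≥ q
theorem pvBsLoop_spec (l : List String) (q : String) (hs : l.Pairwise (· ≤ ·)) :
    ∀ (fuel lo hi : Nat), lo ≤ hi → hi ≤ l.length → hi - lo ≤ fuel →
      (∀ j, (hj : j < l.length) → j < lo → l[j] < q) →
      (∀ j, (hj : j < l.length) → hi ≤ j → q ≤ l[j]) →
      (pvBsLoop l q fuel lo hi ≤ l.length ∧
       (∀ j, (hj : j < l.length) → j < pvBsLoop l q fuel lo hi → l[j] < q) ∧
       (∀ j, (hj : j < l.length) → pvBsLoop l q fuel lo hi ≤ j → q ≤ l[j])) := by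
  intro fuel
  induction fuel with
  | zero =>
    intro lo hi hlohi hhi hfuel hlt hge
    have : lo = hi := by omega
    subst this
    exact ⟨by simpa [pvBsLoop] using hhi, fun j hj h => hlt j hj (by simpa [pvBsLoop] using h),
      fun j hj h => hge j hj (by simpa [pvBsLoop] using h)⟩
  | succ n ih =>
    intro lo hi hlohi hhi hfuel hlt hge
    by_cases h : lo < hi
    · have hmid : (lo + hi) / 2 < l.length := by omega
      rw [pvBsLoop, if_pos h]
      have hgetD : l.getD ((lo + hi) / 2) "" = l[(lo + hi) / 2] := List.getD_eq_getElem l _ hmid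
      by_cases hc : l.getD ((lo + hi) / 2) "" < q
      · rw [if_pos hc]
        refine ih ((lo + hi) / 2 + 1) hi (by omega) hhi (by omega) ?_ hge
        intro j hj hjlt
        rcases Nat.lt_or_ge j lo with h1 | h1
        · exact hlt j hj h1
        · calc l[j] ≤ l[(lo + hi) / 2] := by
                rcases Nat.eq_or_lt_of_le (by omega : j ≤ (lo + hi) / 2) with he | hl
                · exact le_of_eq (by congr 1)
                · exact (List.pairwise_iff_getElem.mp hs) j _ hj hmid hl
            _ < q := hgetD ▸ hc
      · rw [if_neg hc]
        refine ih lo ((lo + hi) / 2) (by omega) (by omega) (by omega) hlt ?_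
        intro j hj hjge
        have hq : q ≤ l[(lo + hi) / 2] := by
          rw [← hgetD]; exact le_of_not_gt hc
        calc q ≤ l[(lo + hi) / 2] := hq
          _ ≤ l[j] := by
              rcases Nat.eq_or_lt_of_le hjge with he | hl
              · exact le_of_eq (by congr 1)
              · exact (List.pairwise_iff_getElem.mp hs) _ j hmid hj hl
    · rw [pvBsLoop, if_neg h]
      have : lo = hi := by omega
      subst this
      exact ⟨by omega, fun j hj hjl => hlt j hj hjl, fun j hj hjg => hge j hj hjg⟩

-- Source B's found-test equals plain membership in the sorted variants list
theorem pvBs_found_iff (l : List String) (q : String) (hs : l.Pairwise (· ≤ ·)) :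
    (decide (pvBsLoop l q l.length 0 l.length < l.length) &&
     (l.getD (pvBsLoop l q l.length 0 l.length) "" == q)) = true ↔ q ∈ l := by
  obtain ⟨hle, hlt, hge⟩ := pvBsLoop_spec l q hs l.length 0 l.length (Nat.zero_le _)
    le_rfl (by omega) (by omega) (by omega)
  set i := pvBsLoop l q l.length 0 l.length with hi
  constructor
  · intro hfound
    simp only [Bool.and_eq_true, decide_eq_true_eq, beq_iff_eq] at hfound
    obtain ⟨h1, h2⟩ := hfound
    rw [List.getD_eq_getElem l _ h1] at h2
    exact h2 ▸ List.getElem_mem h1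
  · intro hmem
    obtain ⟨j, hj, hje⟩ := List.mem_iff_getElem.mp hmem
    have hij : i ≤ j := by
      by_contra hcon
      exact absurd (hje ▸ hlt j hj (by omega)) (lt_irrefl q)
    have hilen : i < l.length := by omega
    have h1 : q ≤ l[i] := hge i hilen le_rfl
    have h2 : l[i] ≤ l[j] := by
      rcases Nat.eq_or_lt_of_le hij with he | hl
      · exact le_of_eq (by congr 1)
      · exact (List.pairwise_iff_getElem.mp hs) i j hilen hj hl
    have : l[i] = q := le_antisymm (hje ▸ h2) h1
    simp [hilen, this]

-- membership in the variants list is exactly A's three-variant test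
theorem pv_mem_variants (q : String) :
    (q ∈ pvVariants) ↔
    (pvGreetings.any (fun g => q == g || q == g ++ "!" || q == g ++ ".")) = true := by
  rw [pvVariants, PySem.List.mem_sorted]
  show (q ∈ pvGreetings.flatMap (fun g => [g, g ++ "!", g ++ "."])) ↔ _
  simp only [List.mem_flatMap, List.any_eq_true, Bool.or_eq_true, beq_iff_eq,
    List.mem_cons, List.not_mem_nil, or_false]
  constructor
  · rintro ⟨g, hg, h | h | h⟩ <;> exact ⟨g, hg, by simp [h]⟩
  · rintro ⟨g, hg, h⟩; exact ⟨g, hg, by tauto⟩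

theorem pvVariants_sorted : pvVariants.Pairwise (· ≤ ·) :=
  PySem.List.sorted_pairwise _ _

-- ===== VERDICT (by name: the statement is the Claim_ definition above) =====
theorem is_greeting_spec : Claim_equal_is_greeting := by
  intro query _
  unfold Spec_is_greeting is_greeting is_greeting_alt
  set q := PySem.Str.strip (PySem.Str.lower query) with hq
  by_cases hm : q ∈ pvVariants
  · rw [if_pos ((pv_mem_variants q).mp hm),
      if_pos ((pvBs_found_iff pvVariants q pvVariants_sorted).mpr hm)]
  · have hA : ¬ ((pvGreetings.any (fun g =>
        q == g || q == g ++ "!" || q == g ++ ".")) = true) :=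
      fun h => hm ((pv_mem_variants q).mpr h)
    have hB : ¬ ((decide (pvBsLoop pvVariants q pvVariants.length 0 pvVariants.length < pvVariants.length) &&
        (pvVariants.getD (pvBsLoop pvVariants q pvVariants.length 0 pvVariants.length) "" == q)) = true) :=
      fun h => hm ((pvBs_found_iff pvVariants q pvVariants_sorted).mp h)
    rw [if_neg hA, if_neg hB]
    cases (decide (PySem.Str.len q ≤ 3) && PySem.Str.strIsalpha q) <;> simp
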